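-- pv_equiv track=rewrite | github.com/hariharan077/sebi-orders-rag | scripts/sebi_eval_failure_dump.py | _pick_primary_bucket
-- ===== SOURCE A (Python) =====
-- def _pick_primary_bucket(tags: list[str]) -> str:
--     priority = (
--         "contamination",
--         "stale expectation",
--         "weak metadata extraction",
--         "wrong candidate ranking",
--         "wrong route",
--         "wrong answer despite correct route",
--     )
--     for bucket in priority:
--         if bucket in tags:
--             return bucket
--     return tags[0]
-- ===== SOURCE B (Python) =====
-- def _pick_primary_bucket(tags: list[str]) -> str:
--     priority = (
--         "contamination",
--         "stale expectation",
--         "weak metadata extraction",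
--         "wrong candidate ranking",
--         "wrong route",
--         "wrong answer despite correct route",
--     )
--     rank = {bucket: i for i, bucket in enumerate(priority)}
--     present = [t for t in tags if t in rank]
--     if present:
--         return min(present, key=rank.__getitem__)
--     return tags[0]
-- ===== Notes on version B (the rewrite author's own statement) =====
-- stated objective: alternative
-- what changed: Replaces the loop over the priority tuple with in-tags membership tests by a precomputed rank dict, one filtering pass over tags, and an argmin on the rank; falls back to tags[0] as before.
import Mathlib
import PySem

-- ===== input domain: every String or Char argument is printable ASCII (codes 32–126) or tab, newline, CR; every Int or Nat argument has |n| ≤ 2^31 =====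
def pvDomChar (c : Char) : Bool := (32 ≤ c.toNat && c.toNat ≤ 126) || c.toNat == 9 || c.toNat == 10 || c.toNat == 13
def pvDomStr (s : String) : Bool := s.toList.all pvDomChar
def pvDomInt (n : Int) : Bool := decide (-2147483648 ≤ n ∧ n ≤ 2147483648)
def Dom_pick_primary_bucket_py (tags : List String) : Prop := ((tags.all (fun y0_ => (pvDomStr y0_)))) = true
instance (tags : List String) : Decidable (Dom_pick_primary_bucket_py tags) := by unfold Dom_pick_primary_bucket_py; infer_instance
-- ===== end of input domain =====

-- B replaces A's loop over the priority tuple (membership test in tags each step) by a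
-- precomputed rank dict, one filtering pass over tags and an argmin on the rank (objective: alternative).

-- the priority tuple shared by both sources
def pvPrio : List String :=
  ["contamination", "stale expectation", "weak metadata extraction",
   "wrong candidate ranking", "wrong route", "wrong answer despite correct route"]

-- ===== PORT A =====
-- A's 'for bucket in priority' loop; on fall-through, tags[0] (Pre_ guarantees tags ≠ [])
def pickLoopA (tags : List String) : List String → String
  | [] => (PySem.List.pyGet? tags 0).getD ""
  | b :: rest => if tags.contains b then b else pickLoopA tags rest

def pick_primary_bucket_py (tags : List String) : String :=
  pickLoopA tags pvPrio

-- ===== PORT B =====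
-- rank = {bucket: i for i, bucket in enumerate(priority)}
def pvRank : PySem.Dict String Int :=
  (PySem.List.enumerate pvPrio).foldl (fun d p => d.insert p.2 p.1) PySem.Dict.empty

-- min(present, key=rank.__getitem__): every element of present is a key of rank,
-- so getD with default 0 is exact for __getitem__ here
def pick_primary_bucket_py_alt (tags : List String) : String :=
  let present := tags.filter (fun t => pvRank.contains t)
  match PySem.List.min? present (fun t => pvRank.getD t 0) with
  | some m => m
  | none => (PySem.List.pyGet? tags 0).getD ""

-- ===== PRECONDITION & SPEC =====
-- Pre_ excludes the empty list, on which the Python A (and B) raises IndexError at tags[0]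
def Pre_pick_primary_bucket_py (tags : List String) : Prop := tags ≠ []
instance (tags : List String) : Decidable (Pre_pick_primary_bucket_py tags) := by unfold Pre_pick_primary_bucket_py; infer_instance
def pvWitness_pick_primary_bucket_py : List String := ["wrong route", "extra"]

def Spec_pick_primary_bucket_py (tags : List String) (out : String) : Prop := out = pick_primary_bucket_py_alt tags
instance (tags : List String) (out : String) : Decidable (Spec_pick_primary_bucket_py tags out) := by unfold Spec_pick_primary_bucket_py; infer_instance

-- ===== CLAIM (what is proved, stated in full; the proofs are below) =====
def Claim_equal_pick_primary_bucket_py : Prop := ∀ (tags : List String), Dom_pick_primary_bucket_py tags → Pre_pick_primary_bucket_py tags → Spec_pick_primary_bucket_py tags (pick_primary_bucket_py tags)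

-- ===== LEMMAS AND PROOFS =====

def pvKey (t : String) : Int := pvRank.getD t 0

theorem contains_pvRank (m : String) : pvRank.contains m = true ↔
    (m = "contamination" ∨ m = "stale expectation" ∨ m = "weak metadata extraction" ∨
     m = "wrong candidate ranking" ∨ m = "wrong route" ∨ m = "wrong answer despite correct route") := by
  rw [PySem.Dict.contains_eq_decide_mem_keys]
  have hk : pvRank.keys = pvPrio := by decide
  rw [hk]
  simp [pvPrio]

theorem min?_eq_of_first (xs : List String) (key : String → Int) (b : String)
    (hb : b ∈ xs) (h : ∀ m ∈ xs, key b ≤ key m ∧ (key m ≤ key b → m = b)) :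
    PySem.List.min? xs key = some b := by
  cases e : PySem.List.min? xs key with
  | none =>
    rw [PySem.List.min?_eq_none_iff] at e
    subst e; cases hb
  | some m =>
    have hm := PySem.List.min?_mem e
    have h1 := PySem.List.min?_isMin e b hb
    rw [(h m hm).2 h1]

theorem alt_eq_of (tags : List String) (b : String) (hb : b ∈ tags)
    (hcb : pvRank.contains b = true)
    (h : ∀ m ∈ tags, pvRank.contains m = true → pvKey b ≤ pvKey m ∧ (pvKey m ≤ pvKey b → m = b)) :
    pick_primary_bucket_py_alt tags = b := by
  have hbp : b ∈ tags.filter (fun t => pvRank.contains t) := List.mem_filter.mpr ⟨hb, hcb⟩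
  show (match PySem.List.min? (tags.filter (fun t => pvRank.contains t)) (fun t => pvRank.getD t 0) with
        | some m => m
        | none => (PySem.List.pyGet? tags 0).getD "") = b
  rw [min?_eq_of_first _ (fun t => pvRank.getD t 0) b hbp
    (fun m hm => h m (List.mem_filter.mp hm).1 (List.mem_filter.mp hm).2)]

theorem alt_eq_fallback (tags : List String)
    (h : ∀ m ∈ tags, pvRank.contains m = false) :
    pick_primary_bucket_py_alt tags = (PySem.List.pyGet? tags 0).getD "" := by
  have hf : tags.filter (fun t => pvRank.contains t) = [] :=
    List.filter_eq_nil_iff.mpr (fun a ha => by simp [h a ha])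
  show (match PySem.List.min? (tags.filter (fun t => pvRank.contains t)) (fun t => pvRank.getD t 0) with
        | some m => m
        | none => (PySem.List.pyGet? tags 0).getD "") = (PySem.List.pyGet? tags 0).getD ""
  rw [hf]
  rfl

theorem pick_eq_alt (tags : List String) :
    pick_primary_bucket_py tags = pick_primary_bucket_py_alt tags := by
  by_cases h1 : "contamination" ∈ tags
  · have hA : pick_primary_bucket_py tags = "contamination" := by
      simp [pick_primary_bucket_py, pvPrio, pickLoopA, h1]
    rw [hA, alt_eq_of tags _ h1 (by decide)]
    intro m hm hc
    rcases (contains_pvRank m).mp hc with rfl|rfl|rfl|rfl|rfl|rfl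
    · exact ⟨by decide, fun _ => rfl⟩
    · exact ⟨by decide, fun hle => absurd hle (by decide)⟩
    · exact ⟨by decide, fun hle => absurd hle (by decide)⟩
    · exact ⟨by decide, fun hle => absurd hle (by decide)⟩
    · exact ⟨by decide, fun hle => absurd hle (by decide)⟩
    · exact ⟨by decide, fun hle => absurd hle (by decide)⟩
  by_cases h2 : "stale expectation" ∈ tags
  · have hA : pick_primary_bucket_py tags = "stale expectation" := by
      simp [pick_primary_bucket_py, pvPrio, pickLoopA, h1, h2]
    rw [hA, alt_eq_of tags _ h2 (by decide)]
    intro m hm hc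
    rcases (contains_pvRank m).mp hc with rfl|rfl|rfl|rfl|rfl|rfl
    · exact absurd hm h1
    · exact ⟨by decide, fun _ => rfl⟩
    · exact ⟨by decide, fun hle => absurd hle (by decide)⟩
    · exact ⟨by decide, fun hle => absurd hle (by decide)⟩
    · exact ⟨by decide, fun hle => absurd hle (by decide)⟩
    · exact ⟨by decide, fun hle => absurd hle (by decide)⟩
  by_cases h3 : "weak metadata extraction" ∈ tags
  · have hA : pick_primary_bucket_py tags = "weak metadata extraction" := by
      simp [pick_primary_bucket_py, pvPrio, pickLoopA, h1, h2, h3]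
    rw [hA, alt_eq_of tags _ h3 (by decide)]
    intro m hm hc
    rcases (contains_pvRank m).mp hc with rfl|rfl|rfl|rfl|rfl|rfl
    · exact absurd hm h1
    · exact absurd hm h2
    · exact ⟨by decide, fun _ => rfl⟩
    · exact ⟨by decide, fun hle => absurd hle (by decide)⟩
    · exact ⟨by decide, fun hle => absurd hle (by decide)⟩
    · exact ⟨by decide, fun hle => absurd hle (by decide)⟩
  by_cases h4 : "wrong candidate ranking" ∈ tags
  · have hA : pick_primary_bucket_py tags = "wrong candidate ranking" := by
      simp [pick_primary_bucket_py, pvPrio, pickLoopA, h1, h2, h3, h4]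
    rw [hA, alt_eq_of tags _ h4 (by decide)]
    intro m hm hc
    rcases (contains_pvRank m).mp hc with rfl|rfl|rfl|rfl|rfl|rfl
    · exact absurd hm h1
    · exact absurd hm h2
    · exact absurd hm h3
    · exact ⟨by decide, fun _ => rfl⟩
    · exact ⟨by decide, fun hle => absurd hle (by decide)⟩
    · exact ⟨by decide, fun hle => absurd hle (by decide)⟩
  by_cases h5 : "wrong route" ∈ tags
  · have hA : pick_primary_bucket_py tags = "wrong route" := by
      simp [pick_primary_bucket_py, pvPrio, pickLoopA, h1, h2, h3, h4, h5]
    rw [hA, alt_eq_of tags _ h5 (by decide)]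
    intro m hm hc
    rcases (contains_pvRank m).mp hc with rfl|rfl|rfl|rfl|rfl|rfl
    · exact absurd hm h1
    · exact absurd hm h2
    · exact absurd hm h3
    · exact absurd hm h4
    · exact ⟨by decide, fun _ => rfl⟩
    · exact ⟨by decide, fun hle => absurd hle (by decide)⟩
  by_cases h6 : "wrong answer despite correct route" ∈ tags
  · have hA : pick_primary_bucket_py tags = "wrong answer despite correct route" := by
      simp [pick_primary_bucket_py, pvPrio, pickLoopA, h1, h2, h3, h4, h5, h6]
    rw [hA, alt_eq_of tags _ h6 (by decide)]
    intro m hm hc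
    rcases (contains_pvRank m).mp hc with rfl|rfl|rfl|rfl|rfl|rfl
    · exact absurd hm h1
    · exact absurd hm h2
    · exact absurd hm h3
    · exact absurd hm h4
    · exact absurd hm h5
    · exact ⟨by decide, fun _ => rfl⟩
  · have hA : pick_primary_bucket_py tags = (PySem.List.pyGet? tags 0).getD "" := by
      simp [pick_primary_bucket_py, pvPrio, pickLoopA, h1, h2, h3, h4, h5, h6]
    rw [hA, alt_eq_fallback]
    intro m hm
    cases e : pvRank.contains m with
    | false => rfl
    | true =>
      rcases (contains_pvRank m).mp e with rfl|rfl|rfl|rfl|rfl|rfl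
      · exact absurd hm h1
      · exact absurd hm h2
      · exact absurd hm h3
      · exact absurd hm h4
      · exact absurd hm h5
      · exact absurd hm h6

-- ===== VERDICT (by name: the statement is the Claim_ definition above) =====
theorem pick_primary_bucket_py_spec : Claim_equal_pick_primary_bucket_py := by
  intro tags _ _
  unfold Spec_pick_primary_bucket_py
  exact pick_eq_alt tags
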